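-- pv_equiv track=rewrite | github.com/digidem/qgis-smp-plugin | comapeo_smp_generator.py | _zoom_gap_levels
-- ===== SOURCE A (Python) =====
-- def _zoom_gap_levels(export_zooms):
--     if not export_zooms:
--         return []
--     zoom_set = set(export_zooms)
--     return [
--         zoom for zoom in range(export_zooms[0], export_zooms[-1] + 1)
--         if zoom not in zoom_set
--     ]
-- ===== SOURCE B (Python) =====
-- def _zoom_gap_levels(export_zooms):
--     if not export_zooms:
--         return []
--     lo, hi = export_zooms[0], export_zooms[-1]
--     present = sorted(set(z for z in export_zooms if lo <= z <= hi))
--     gaps = []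
--     cur = lo
--     for p in present:
--         gaps.extend(range(cur, p))
--         cur = p + 1
--     gaps.extend(range(cur, hi + 1))
--     return gaps
-- ===== Notes on version B (the rewrite author's own statement) =====
-- stated objective: alternative
-- what changed: Instead of filtering every level of the full range against a membership set, B sorts the distinct in-range values once and emits the gaps in a single gap-filling walk between consecutive present levels.
import Mathlib
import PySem

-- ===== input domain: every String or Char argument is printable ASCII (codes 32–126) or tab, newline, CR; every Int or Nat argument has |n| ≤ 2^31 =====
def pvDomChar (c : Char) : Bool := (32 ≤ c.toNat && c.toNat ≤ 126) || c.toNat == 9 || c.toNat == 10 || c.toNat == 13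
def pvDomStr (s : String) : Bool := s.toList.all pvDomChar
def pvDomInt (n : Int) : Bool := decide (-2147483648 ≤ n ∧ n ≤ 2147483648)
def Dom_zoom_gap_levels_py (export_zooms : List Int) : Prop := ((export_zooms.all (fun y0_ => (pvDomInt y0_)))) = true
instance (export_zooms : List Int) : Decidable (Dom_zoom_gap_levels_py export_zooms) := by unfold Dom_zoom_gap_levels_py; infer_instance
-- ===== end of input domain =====

-- B replaces the range-filter with a sort-then-gap-fill walk over the distinct in-range levels (alternative decomposition, same results).
-- ===== PORT A =====
def zoom_gap_levels_py (export_zooms : List Int) : List Int :=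
  if export_zooms = [] then []
  else
    let zoom_set : PySem.Set Int := PySem.Set.ofList export_zooms
    (PySem.List.pyRange export_zooms.headI (export_zooms.getLastD 0 + 1) 1).filter
      (fun zoom => !(PySem.Set.contains zoom_set zoom))

-- ===== PORT B =====
def zoom_gap_levels_py_alt (export_zooms : List Int) : List Int :=
  if export_zooms = [] then []
  else
    let lo := export_zooms.headI
    let hi := export_zooms.getLastD 0
    let present := PySem.List.sorted
      (PySem.Set.ofList (export_zooms.filter (fun z => decide (lo ≤ z ∧ z ≤ hi))))
      (fun z => z) false
    let st := present.foldl
      (fun (s : List Int × Int) p => (s.1 ++ PySem.List.pyRange s.2 p 1, p + 1)) ([], lo)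
    st.1 ++ PySem.List.pyRange st.2 (hi + 1) 1

-- ===== PRECONDITION & SPEC =====
def Spec_zoom_gap_levels_py (export_zooms : List Int) (out : List Int) : Prop := out = zoom_gap_levels_py_alt export_zooms
instance (export_zooms : List Int) (out : List Int) : Decidable (Spec_zoom_gap_levels_py export_zooms out) := by unfold Spec_zoom_gap_levels_py; infer_instance

-- ===== CLAIM (what is proved, stated in full; the proofs are below) =====
def Claim_equal_zoom_gap_levels_py : Prop := ∀ (export_zooms : List Int), Dom_zoom_gap_levels_py export_zooms → Spec_zoom_gap_levels_py export_zooms (zoom_gap_levels_py export_zooms)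

-- ===== LEMMAS AND PROOFS =====


-- recursive characterisation of B's gap-filling fold (proof helper only)
def pvGapGo (cur hi : Int) (ps : List Int) : List Int :=
  match ps with
  | [] => PySem.List.pyRange cur (hi + 1) 1
  | p :: rest => PySem.List.pyRange cur p 1 ++ pvGapGo (p + 1) hi rest

theorem pvFold_eq_gapGo (ps : List Int) (hi : Int) : ∀ (acc : List Int) (cur : Int),
    (let st := ps.foldl (fun (s : List Int × Int) p => (s.1 ++ PySem.List.pyRange s.2 p 1, p + 1)) (acc, cur)
     st.1 ++ PySem.List.pyRange st.2 (hi + 1) 1) = acc ++ pvGapGo cur hi ps := by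
  induction ps with
  | nil => intro acc cur; simp [pvGapGo]
  | cons p rest ih =>
      intro acc cur
      simp only [List.foldl_cons, pvGapGo]
      rw [ih (acc ++ PySem.List.pyRange cur p 1) (p + 1), List.append_assoc]

theorem pvGapGo_eq_filter (ps : List Int) : ∀ (cur hi : Int),
    ps.Pairwise (· < ·) → (∀ p ∈ ps, cur ≤ p ∧ p ≤ hi) →
    pvGapGo cur hi ps = (PySem.List.pyRange cur (hi + 1) 1).filter (fun z => decide (z ∉ ps)) := by
  induction ps with
  | nil => intro cur hi _ _; simp [pvGapGo]
  | cons p rest ih =>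
      intro cur hi hpw hb
      obtain ⟨hcp, hph⟩ := hb p (by simp)
      have hrest : ∀ r ∈ rest, p < r := fun r hr => (List.pairwise_cons.mp hpw).1 r hr
      have hsplit : PySem.List.pyRange cur (hi + 1) 1 =
          PySem.List.pyRange cur p 1 ++ PySem.List.pyRange p (hi + 1) 1 :=
        PySem.List.pyRange_one_append cur p (hi + 1) hcp (by omega)
      have hcons : PySem.List.pyRange p (hi + 1) 1 = p :: PySem.List.pyRange (p + 1) (hi + 1) 1 :=
        PySem.List.pyRange_one_cons (by omega)
      rw [hsplit, hcons, List.filter_append, List.filter_cons]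
      have h1 : (PySem.List.pyRange cur p 1).filter (fun z => decide (z ∉ p :: rest)) =
          PySem.List.pyRange cur p 1 := by
        apply List.filter_eq_self.mpr
        intro z hz
        have hz' := (PySem.List.mem_pyRange_one).mp hz
        simp only [decide_eq_true_eq, List.mem_cons, not_or]
        exact ⟨by omega, fun hmem => absurd (hrest z hmem) (by omega)⟩
      have h2 : (decide (p ∉ p :: rest)) = false := by simp
      rw [h1, h2]
      have h3 : (PySem.List.pyRange (p + 1) (hi + 1) 1).filter (fun z => decide (z ∉ p :: rest)) =
          (PySem.List.pyRange (p + 1) (hi + 1) 1).filter (fun z => decide (z ∉ rest)) := by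
        apply List.filter_congr
        intro z hz
        have hz' := (PySem.List.mem_pyRange_one).mp hz
        have hne : z ≠ p := by omega
        simp [hne]
      rw [show pvGapGo cur hi (p :: rest) = PySem.List.pyRange cur p 1 ++ pvGapGo (p + 1) hi rest from rfl,
          ih (p + 1) hi (List.pairwise_cons.mp hpw).2
          (fun r hr => ⟨by have := hrest r hr; omega, (hb r (List.mem_cons_of_mem p hr)).2⟩), h3]
      simp

-- ===== VERDICT (by name: the statement is the Claim_ definition above) =====
theorem zoom_gap_levels_py_spec : Claim_equal_zoom_gap_levels_py := by
  intro xs _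
  unfold Spec_zoom_gap_levels_py zoom_gap_levels_py zoom_gap_levels_py_alt
  by_cases hnil : xs = []
  · simp [hnil]
  · simp only [hnil, reduceIte]
    set lo := xs.headI with hlo
    set hi := xs.getLastD 0 with hhi
    set ps := PySem.List.sorted
      (PySem.Set.ofList (xs.filter (fun z => decide (lo ≤ z ∧ z ≤ hi)))) (fun z => z) false with hps
    have hmem : ∀ z : Int, z ∈ ps ↔ (z ∈ xs ∧ lo ≤ z ∧ z ≤ hi) := by
      intro z
      rw [hps, PySem.List.mem_sorted, PySem.Set.mem_ofList, List.mem_filter]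
      simp
    have hpw : ps.Pairwise (· < ·) := PySem.List.sorted_ofList_pairwise_lt _
    rw [pvFold_eq_gapGo, List.nil_append,
        pvGapGo_eq_filter ps lo hi hpw (fun p hp => ((hmem p).mp hp).2)]
    apply List.filter_congr
    intro z hz
    have hz' := (PySem.List.mem_pyRange_one).mp hz
    have : (PySem.Set.contains (PySem.Set.ofList xs) z = true) ↔ z ∈ ps := by
      rw [PySem.Set.contains_iff, PySem.Set.mem_ofList, hmem]
      constructor
      · intro h; exact ⟨h, by omega, by omega⟩
      · intro h; exact h.1
    by_cases hc : z ∈ ps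
    · have hx : z ∈ xs := ((hmem z).mp hc).1
      simp [hc, hx]
    · have hx : z ∉ xs := fun h => hc ((hmem z).mpr ⟨h, by omega, by omega⟩)
      simp [hc, hx]
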